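-- pv_equiv track=rewrite | github.com/Crow11111/CORE | src/logic_core/quaternion_duality.py | compute_phase_shift
-- ===== SOURCE A (Python) =====
-- PISL_MAP: dict[str, str] = {"L": "P", "P": "I", "I": "S", "S": "L"}
--
-- _VALID_BASES = frozenset("LPIS")
--
-- def _validate_sequence(sequence: str) -> str:
--     seq = sequence.upper().replace(" ", "")
--     invalid = [c for c in seq if c not in _VALID_BASES]
--     if invalid:
--         raise ValueError(f"Ungueltiges Zeichen in Sequenz: {invalid}. Nur L/P/I/S erlaubt.")
--     return seq
--
-- def compute_phase_shift(seq_a: str, seq_b: str) -> int: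
--     """Berechnet die minimale zyklische Phasenverschiebung zwischen zwei Sequenzen.
--
--     Probiert 0-3 Rotationen durch und gibt die Anzahl der Rotationen zurueck,
--     bei der seq_a in seq_b transformiert wird. -1 falls keine Rotation passt.
--
--     >>> compute_phase_shift("LPIS", "PISL")
--     1
--     >>> compute_phase_shift("LPIS", "LPIS")
--     0
--     >>> compute_phase_shift("LPIS", "ISLP")
--     2
--     """
--     a = _validate_sequence(seq_a)
--     b = _validate_sequence(seq_b)
--
--     if len(a) != len(b):
--         return -1
--
--     current = a
--     for shift in range(4):
--         if current == b:
--             return shift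
--         current = "".join(PISL_MAP[c] for c in current)
--
--     return -1
-- ===== SOURCE B (Python) =====
-- PISL_MAP: dict[str, str] = {"L": "P", "P": "I", "I": "S", "S": "L"}
--
-- _VALID_BASES = frozenset("LPIS")
--
-- _ORDER = "LPIS"
--
-- def _validate_sequence(sequence: str) -> str:
--     seq = sequence.upper().replace(" ", "")
--     invalid = [c for c in seq if c not in _VALID_BASES]
--     if invalid:
--         raise ValueError(f"Ungueltiges Zeichen in Sequenz: {invalid}. Nur L/P/I/S erlaubt.")
--     return seq
--
-- def compute_phase_shift(seq_a: str, seq_b: str) -> int: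
--     a = _validate_sequence(seq_a)
--     b = _validate_sequence(seq_b)
--
--     if len(a) != len(b):
--         return -1
--     if not a:
--         return 0
--
--     s = (_ORDER.index(b[0]) - _ORDER.index(a[0])) % 4
--     for x, y in zip(a, b):
--         if (_ORDER.index(y) - _ORDER.index(x)) % 4 != s:
--             return -1
--     return s
-- ===== Notes on version B (the rewrite author's own statement) =====
-- stated objective: alternative
-- what changed: Instead of rebuilding the string up to four times and comparing against seq_b, B derives the shift arithmetically from the cycle order 'LPIS' at the first position and verifies the per-position offset agreement in a single pass.
import Mathlib
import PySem

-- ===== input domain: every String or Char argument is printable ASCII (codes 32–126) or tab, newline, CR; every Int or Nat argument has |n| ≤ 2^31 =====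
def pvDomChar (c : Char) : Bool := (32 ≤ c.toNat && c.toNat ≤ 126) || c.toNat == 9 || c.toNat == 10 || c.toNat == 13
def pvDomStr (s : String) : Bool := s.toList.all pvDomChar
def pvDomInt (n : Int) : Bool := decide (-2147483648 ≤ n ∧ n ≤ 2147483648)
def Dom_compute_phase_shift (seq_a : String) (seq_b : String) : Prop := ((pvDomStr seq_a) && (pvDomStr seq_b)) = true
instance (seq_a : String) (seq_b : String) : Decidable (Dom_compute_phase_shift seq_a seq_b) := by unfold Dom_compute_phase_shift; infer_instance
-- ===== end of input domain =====

-- B computes the rotation count arithmetically from per-position cycle offsets in one pass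
-- instead of rebuilding the string up to four times (objective: alternative).


-- ===== PORT A =====
-- PISL_MAP = {"L": "P", "P": "I", "I": "S", "S": "L"}
def pvPISLMap : PySem.Dict String String :=
  PySem.Dict.ofList [("L", "P"), ("P", "I"), ("I", "S"), ("S", "L")]

-- _VALID_BASES = frozenset("LPIS")
def pvValidBases : PySem.Set Char := PySem.Set.ofList "LPIS".toList

-- _validate_sequence (shared verbatim by A and B): none = ValueError (excluded by Pre_)
def pvValidate (sequence : String) : Option (List Char) :=
  let seq := PySem.Chars.replace (PySem.Chars.upper sequence.toList) [' '] []
  let invalid := seq.filter (fun c => !(PySem.Set.contains pvValidBases c))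
  if invalid ≠ [] then none else some seq

-- PISL_MAP[c]; the KeyError branch (none) is unreachable on validated characters
def pvMapChar (c : Char) : Char :=
  match PySem.Dict.get? pvPISLMap (String.ofList [c]) with
  | some s => s.toList.headD c
  | none => c

-- the 'for shift in range(4)' loop with its early returns
def pvLoopA (b : List Char) (current : List Char) (shift : Nat) : Int :=
  if shift < 4 then
    if current = b then (shift : Int)
    else pvLoopA b (current.map pvMapChar) (shift + 1)
  else -1
termination_by 4 - shift

def compute_phase_shift (seq_a : String) (seq_b : String) : Int :=
  match pvValidate seq_a, pvValidate seq_b with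
  | some a, some b => if a.length ≠ b.length then -1 else pvLoopA b a 0
  | _, _ => -1

-- ===== PORT B =====
-- _ORDER = "LPIS"
def pvOrder : List Char := "LPIS".toList

-- _ORDER.index(c); ValueError (none) unreachable on validated characters
def pvIdx (c : Char) : Int := ((PySem.List.index? pvOrder c).getD 0 : Nat)

def pvOff (x y : Char) : Int := PySem.Int.mod (pvIdx y - pvIdx x) 4

-- _VALID_BASES and _validate_sequence as Source B carries them (duplicated so the two ports stay independent)
def pvValidBasesB : PySem.Set Char := PySem.Set.ofList "LPIS".toList

def pvValidateB (sequence : String) : Option (List Char) :=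
  let seq := PySem.Chars.replace (PySem.Chars.upper sequence.toList) [' '] []
  let invalid := seq.filter (fun c => !(PySem.Set.contains pvValidBasesB c))
  if invalid ≠ [] then none else some seq

def compute_phase_shift_alt (seq_a : String) (seq_b : String) : Int :=
  match pvValidateB seq_a with
  | none => -1
  | some a =>
    match pvValidateB seq_b with
    | none => -1
    | some b =>
      if a.length ≠ b.length then -1
      else
        match a, b with
        | [], _ => 0
        | x :: _, y :: _ =>
          let s := pvOff x y
          if (a.zip b).all (fun p => pvOff p.1 p.2 == s) then s else -1
        | _, _ => -1  -- unreachable: lengths are equal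

-- ===== PRECONDITION & SPEC =====
-- Pre_ excludes exactly the inputs on which _validate_sequence raises ValueError
-- (a character other than L/P/I/S, case-insensitively, after removing spaces).
def Pre_compute_phase_shift (seq_a : String) (seq_b : String) : Prop :=
  ((PySem.Chars.replace (PySem.Chars.upper seq_a.toList) [' '] []).all
      (fun c => (['L', 'P', 'I', 'S'] : List Char).contains c) = true) ∧
  ((PySem.Chars.replace (PySem.Chars.upper seq_b.toList) [' '] []).all
      (fun c => (['L', 'P', 'I', 'S'] : List Char).contains c) = true)
instance (seq_a : String) (seq_b : String) : Decidable (Pre_compute_phase_shift seq_a seq_b) := by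
  unfold Pre_compute_phase_shift; infer_instance

def pvWitness_compute_phase_shift : String × String := ("LPIS", "PISL")

def Spec_compute_phase_shift (seq_a : String) (seq_b : String) (out : Int) : Prop := out = compute_phase_shift_alt seq_a seq_b
instance (seq_a : String) (seq_b : String) (out : Int) : Decidable (Spec_compute_phase_shift seq_a seq_b out) := by unfold Spec_compute_phase_shift; infer_instance

-- ===== CLAIM (what is proved, stated in full; the proofs are below) =====
def Claim_equal_compute_phase_shift : Prop := ∀ (seq_a : String) (seq_b : String), Dom_compute_phase_shift seq_a seq_b → Pre_compute_phase_shift seq_a seq_b → Spec_compute_phase_shift seq_a seq_b (compute_phase_shift seq_a seq_b)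

-- ===== LEMMAS AND PROOFS =====

-- the two transliterated copies of _validate_sequence are the same function
lemma pvValidateB_eq : pvValidateB = pvValidate := by funext s; rfl

-- under Pre_, validation succeeds and returns the cleaned character list
lemma pvValidate_eq_some (s : String)
    (h : ∀ c ∈ PySem.Chars.replace (PySem.Chars.upper s.toList) [' '] [],
        c ∈ (['L', 'P', 'I', 'S'] : List Char)) :
    pvValidate s = some (PySem.Chars.replace (PySem.Chars.upper s.toList) [' '] []) := by
  unfold pvValidate
  simp
  intro c hc
  have hm := h c hc
  fin_cases hm <;> decide

-- per-character facts: k applications of the cycle map hit y iff the offset is k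
lemma pvChar0 (x y : Char) (hx : x ∈ (['L','P','I','S'] : List Char))
    (hy : y ∈ (['L','P','I','S'] : List Char)) : x = y ↔ pvOff x y = 0 := by
  fin_cases hx <;> fin_cases hy <;> decide

lemma pvChar1 (x y : Char) (hx : x ∈ (['L','P','I','S'] : List Char))
    (hy : y ∈ (['L','P','I','S'] : List Char)) : pvMapChar x = y ↔ pvOff x y = 1 := by
  fin_cases hx <;> fin_cases hy <;> decide

lemma pvChar2 (x y : Char) (hx : x ∈ (['L','P','I','S'] : List Char))
    (hy : y ∈ (['L','P','I','S'] : List Char)) :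
    pvMapChar (pvMapChar x) = y ↔ pvOff x y = 2 := by
  fin_cases hx <;> fin_cases hy <;> decide

lemma pvChar3 (x y : Char) (hx : x ∈ (['L','P','I','S'] : List Char))
    (hy : y ∈ (['L','P','I','S'] : List Char)) :
    pvMapChar (pvMapChar (pvMapChar x)) = y ↔ pvOff x y = 3 := by
  fin_cases hx <;> fin_cases hy <;> decide

-- mapping a list equals b iff every zipped pair matches (same lengths)
lemma pvMapEqIffZip (g : Char → Char) :
    ∀ (a b : List Char), a.length = b.length →
      (a.map g = b ↔ ∀ p ∈ a.zip b, g p.1 = p.2) := by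
  intro a
  induction a with
  | nil => intro b hb; cases b <;> simp at hb ⊢
  | cons x a ih =>
    intro b hb
    cases b with
    | nil => simp at hb
    | cons y b =>
      simp only [List.length_cons, Nat.add_right_cancel_iff] at hb
      simp [ih b hb]

lemma pvLoopA_lt (b cur : List Char) (k : Nat) (h : k < 4) :
    pvLoopA b cur k = if cur = b then (k : Int) else pvLoopA b (cur.map pvMapChar) (k + 1) := by
  rw [pvLoopA]; simp [h]

lemma pvLoopA_end (b cur : List Char) : pvLoopA b cur 4 = -1 := by
  rw [pvLoopA]; simp

-- the core equivalence on validated lists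
lemma pvCore (a b : List Char)
    (ha : ∀ c ∈ a, c ∈ (['L','P','I','S'] : List Char))
    (hb : ∀ c ∈ b, c ∈ (['L','P','I','S'] : List Char))
    (hlen : a.length = b.length) :
    pvLoopA b a 0 =
      (match a, b with
       | [], _ => (0 : Int)
       | x :: _, y :: _ =>
         let s := pvOff x y
         if (a.zip b).all (fun p => pvOff p.1 p.2 == s) then s else -1
       | _, _ => -1) := by
  have key : ∀ (g : Char → Char) (k : Int),
      (∀ x ∈ (['L','P','I','S'] : List Char), ∀ y ∈ (['L','P','I','S'] : List Char),
        (g x = y ↔ pvOff x y = k)) →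
      ((a.map g = b) ↔ ∀ p ∈ a.zip b, pvOff p.1 p.2 = k) := by
    intro g k hg
    rw [pvMapEqIffZip g a b hlen]
    constructor
    · intro H p hp
      rcases p with ⟨x, y⟩
      have hm := List.of_mem_zip hp
      exact (hg x (ha x hm.1) y (hb y hm.2)).mp (H (x, y) hp)
    · intro H p hp
      rcases p with ⟨x, y⟩
      have hm := List.of_mem_zip hp
      exact (hg x (ha x hm.1) y (hb y hm.2)).mpr (H (x, y) hp)
  have C0 : (a = b) ↔ ∀ p ∈ a.zip b, pvOff p.1 p.2 = 0 := by
    have := key id 0 (fun x hx y hy => by simpa using pvChar0 x y hx hy)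
    rwa [List.map_id] at this
  have C1 := key pvMapChar 1 (fun x hx y hy => pvChar1 x y hx hy)
  have C2 := key (fun c => pvMapChar (pvMapChar c)) 2 (fun x hx y hy => pvChar2 x y hx hy)
  have C3 := key (fun c => pvMapChar (pvMapChar (pvMapChar c))) 3
    (fun x hx y hy => pvChar3 x y hx hy)
  have hchain : pvLoopA b a 0 =
      if a = b then (0 : Int)
      else if a.map pvMapChar = b then 1
      else if a.map (fun c => pvMapChar (pvMapChar c)) = b then 2
      else if a.map (fun c => pvMapChar (pvMapChar (pvMapChar c))) = b then 3
      else -1 := by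
    rw [pvLoopA_lt b a 0 (by omega), pvLoopA_lt b _ 1 (by omega),
      pvLoopA_lt b _ 2 (by omega), pvLoopA_lt b _ 3 (by omega), pvLoopA_end]
    simp [List.map_map, Function.comp_def]
  cases a with
  | nil =>
    cases b with
    | nil => simp [pvLoopA]
    | cons y b' => simp at hlen
  | cons x a' =>
    cases b with
    | nil => simp at hlen
    | cons y b' =>
      simp only [hchain, C0, C1, C2, C3]
      have hhead : (x, y) ∈ (x :: a').zip (y :: b') := by simp [List.zip_cons_cons]
      have hs0 : 0 ≤ pvOff x y := PySem.Int.mod_nonneg _ (by norm_num)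
      have hs4 : pvOff x y < 4 := PySem.Int.mod_lt _ (by norm_num)
      have hall : (((x :: a').zip (y :: b')).all
          (fun p => pvOff p.1 p.2 == pvOff x y) = true) ↔
          ∀ p ∈ (x :: a').zip (y :: b'), pvOff p.1 p.2 = pvOff x y := by
        simp [List.all_eq_true]
      by_cases H : ∀ p ∈ (x :: a').zip (y :: b'), pvOff p.1 p.2 = pvOff x y
      · rw [if_pos (hall.mpr H)]
        have hone : ∀ k : Int,
            (∀ p ∈ (x :: a').zip (y :: b'), pvOff p.1 p.2 = k) ↔ pvOff x y = k := by
          intro k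
          constructor
          · intro HK; exact HK (x, y) hhead
          · intro hk p hp; rw [H p hp, hk]
        simp only [hone]
        have hsv : pvOff x y = 0 ∨ pvOff x y = 1 ∨ pvOff x y = 2 ∨ pvOff x y = 3 := by omega
        rcases hsv with h | h | h | h <;> simp [h]
      · have hfalse : ∀ k : Int, ¬ (∀ p ∈ (x :: a').zip (y :: b'), pvOff p.1 p.2 = k) := by
          intro k HK
          apply H
          intro p hp
          rw [HK p hp, ← HK (x, y) hhead]
        rw [if_neg (hfalse 0), if_neg (hfalse 1), if_neg (hfalse 2), if_neg (hfalse 3),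
          if_neg (fun hc => H (hall.mp hc))]

theorem compute_phase_shift_spec : Claim_equal_compute_phase_shift := by
  intro seq_a seq_b hdom hpre
  obtain ⟨h1b, h2b⟩ := hpre
  have h1 : ∀ c ∈ PySem.Chars.replace (PySem.Chars.upper seq_a.toList) [' '] [],
      c ∈ (['L', 'P', 'I', 'S'] : List Char) := by simpa using h1b
  have h2 : ∀ c ∈ PySem.Chars.replace (PySem.Chars.upper seq_b.toList) [' '] [],
      c ∈ (['L', 'P', 'I', 'S'] : List Char) := by simpa using h2b
  unfold Spec_compute_phase_shift compute_phase_shift compute_phase_shift_alt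
  rw [pvValidateB_eq, pvValidate_eq_some seq_a h1, pvValidate_eq_some seq_b h2]
  simp only
  set la := PySem.Chars.replace (PySem.Chars.upper seq_a.toList) [' '] [] with hA
  set lb := PySem.Chars.replace (PySem.Chars.upper seq_b.toList) [' '] [] with hB
  clear_value la lb
  by_cases hl : la.length = lb.length
  · simp only [hl, ne_eq, not_true_eq_false, if_false]
    cases la with
    | nil =>
      cases lb with
      | nil => simp [pvLoopA]
      | cons y lb' => simp at hl
    | cons x la' =>
      cases lb with
      | nil => simp at hl
      | cons y lb' =>
        have hc := pvCore (x :: la') (y :: lb') h1 h2 hl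
        simpa using hc
  · simp [hl]
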